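-- pv_equiv track=rewrite | github.com/vamsi-chittoor-constient/chatbot--ai | restaurant-chatbot/scripts/import_menu_3nf.py | infer_dietary_tags
-- ===== SOURCE A (Python) =====
-- from typing import Dict, List, Set, Optional, Any
--
-- DIETARY_INFERENCE = {
--     "vegan": {
--         "exclude": ["milk", "cheese", "butter", "cream", "paneer", "ghee", "egg", "fish", "chicken", "mutton", "meat"],
--         "include": []
--     },
--     "vegetarian": {
--         "exclude": ["fish", "chicken", "mutton", "meat", "prawn", "crab"],
--         "include": []
--     },
--     "gluten_free": {
--         "exclude": ["wheat", "flour", "maida", "bread", "roti", "naan", "paratha"],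
--         "include": []
--     },
--     "dairy_free": {
--         "exclude": ["milk", "cheese", "butter", "cream", "paneer", "ghee"],
--         "include": []
--     }
-- }
--
-- def infer_dietary_tags(ingredients: List[str], allergens: List[str]) -> Set[str]:
--     """
--     Infer dietary tags based on ingredients and allergens.
--     """
--     tags = set()
--     all_text = ' '.join(ingredients + allergens).lower()
--
--     for tag_name, rules in DIETARY_INFERENCE.items():
--         # Check exclusions
--         has_exclusion = any(exclude in all_text for exclude in rules["exclude"])
--
--         if not has_exclusion:
--             tags.add(tag_name)
--
--     return tags
-- ===== SOURCE B (Python) =====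
-- from typing import Dict, List, Set, Optional, Any
--
-- DIETARY_INFERENCE = {
--     "vegan": {
--         "exclude": ["milk", "cheese", "butter", "cream", "paneer", "ghee", "egg", "fish", "chicken", "mutton", "meat"],
--         "include": []
--     },
--     "vegetarian": {
--         "exclude": ["fish", "chicken", "mutton", "meat", "prawn", "crab"],
--         "include": []
--     },
--     "gluten_free": {
--         "exclude": ["wheat", "flour", "maida", "bread", "roti", "naan", "paratha"],
--         "include": []
--     },
--     "dairy_free": {
--         "exclude": ["milk", "cheese", "butter", "cream", "paneer", "ghee"],
--         "include": []
--     }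
-- }
--
-- def infer_dietary_tags(ingredients: List[str], allergens: List[str]) -> Set[str]:
--     """Infer dietary tags: index the text once, then query per tag."""
--     all_text = ' '.join(ingredients + allergens).lower()
--     # phase 1: build the index of excluder substrings that actually occur
--     all_excluders = [w for rules in DIETARY_INFERENCE.values() for w in rules["exclude"]]
--     present = {w for w in all_excluders if w in all_text}
--     # phase 2: a tag applies iff its exclude list misses the index entirely
--     return {tag for tag, rules in DIETARY_INFERENCE.items() if present.isdisjoint(rules["exclude"])}
-- ===== Notes on version B (the rewrite author's own statement) =====
-- stated objective: alternative
-- what changed: A rescans the joined text per tag with any(substring) over each exclude list; B builds an index once (the set of all excluder substrings present in the text) and then decides each tag by set-disjointness of its exclude list against that index.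
import Mathlib
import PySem

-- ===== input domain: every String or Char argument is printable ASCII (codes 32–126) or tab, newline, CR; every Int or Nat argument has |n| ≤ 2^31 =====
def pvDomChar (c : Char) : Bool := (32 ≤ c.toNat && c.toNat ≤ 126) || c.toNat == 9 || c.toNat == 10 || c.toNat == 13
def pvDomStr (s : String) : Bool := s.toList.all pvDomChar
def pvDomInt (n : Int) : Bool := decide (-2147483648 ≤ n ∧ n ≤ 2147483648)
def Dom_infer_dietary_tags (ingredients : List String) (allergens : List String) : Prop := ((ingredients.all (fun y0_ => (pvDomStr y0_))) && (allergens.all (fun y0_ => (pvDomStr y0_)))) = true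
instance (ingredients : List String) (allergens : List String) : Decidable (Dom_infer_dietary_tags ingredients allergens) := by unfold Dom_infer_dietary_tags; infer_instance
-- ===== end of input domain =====

-- B replaces A's per-tag rescanning of the text by a two-phase structure: build once the set of
-- excluder substrings present in the text, then decide each tag by set-disjointness (objective: alternative).

-- ===== PORT A =====
-- DIETARY_INFERENCE: tag ↦ (exclude list, include list)
def pvDI : List (String × (List String × List String)) :=
  [("vegan", (["milk", "cheese", "butter", "cream", "paneer", "ghee", "egg", "fish", "chicken", "mutton", "meat"], [])),
   ("vegetarian", (["fish", "chicken", "mutton", "meat", "prawn", "crab"], [])),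
   ("gluten_free", (["wheat", "flour", "maida", "bread", "roti", "naan", "paratha"], [])),
   ("dairy_free", (["milk", "cheese", "butter", "cream", "paneer", "ghee"], []))]

def infer_dietary_tags (ingredients : List String) (allergens : List String) : List String :=
  let all_text := PySem.Str.lower (PySem.Str.join " " (ingredients ++ allergens))
  pvDI.foldl (fun tags it =>
    let has_exclusion := it.2.1.any (fun ex => PySem.Str.isIn ex all_text)
    if !has_exclusion then PySem.Set.add tags it.1 else tags) PySem.Set.empty

-- ===== PORT B =====
def infer_dietary_tags_alt (ingredients : List String) (allergens : List String) : List String :=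
  let all_text := PySem.Str.lower (PySem.Str.join " " (ingredients ++ allergens))
  let all_excluders := pvDI.flatMap (fun it => it.2.1)
  let present := PySem.Set.ofList (all_excluders.filter (fun w => PySem.Str.isIn w all_text))
  PySem.Set.ofList ((pvDI.filter (fun it => PySem.Set.isdisjoint present it.2.1)).map (fun it => it.1))

-- ===== PRECONDITION & SPEC =====
def Spec_infer_dietary_tags (ingredients : List String) (allergens : List String) (out : List String) : Prop := out = infer_dietary_tags_alt ingredients allergens
instance (ingredients : List String) (allergens : List String) (out : List String) : Decidable (Spec_infer_dietary_tags ingredients allergens out) := by unfold Spec_infer_dietary_tags; infer_instance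

-- ===== CLAIM (what is proved, stated in full; the proofs are below) =====
def Claim_equal_infer_dietary_tags : Prop := ∀ (ingredients : List String) (allergens : List String), Dom_infer_dietary_tags ingredients allergens → Spec_infer_dietary_tags ingredients allergens (infer_dietary_tags ingredients allergens)

-- ===== LEMMAS AND PROOFS =====

-- a tag's exclude list is disjoint from B's index of present words iff no exclude occurs in the text
lemma disjoint_eq (t : String) (pool : List String) (ex : List String) (hex : ∀ w ∈ ex, w ∈ pool) :
    PySem.Set.isdisjoint (PySem.Set.ofList (pool.filter (fun w => PySem.Str.isIn w t))) ex
      = !(ex.any (fun w => PySem.Str.isIn w t)) := by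
  cases h : ex.any (fun w => PySem.Str.isIn w t) with
  | false =>
    simp only [Bool.not_false]
    rw [PySem.Set.isdisjoint_iff]
    intro x hx hxex
    rw [PySem.Set.mem_ofList, List.mem_filter] at hx
    simp only [List.any_eq_false] at h
    exact absurd hx.2 (by simpa using h x hxex)
  | true =>
    simp only [Bool.not_true]
    rw [Bool.eq_false_iff]
    intro hd
    rw [PySem.Set.isdisjoint_iff] at hd
    simp only [List.any_eq_true] at h
    obtain ⟨w, hwex, hwt⟩ := h
    exact hd w (by rw [PySem.Set.mem_ofList, List.mem_filter]; exact ⟨hex w hwex, hwt⟩) hwex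

-- the two phases collapse to A's single pass, for an arbitrary joined text
lemma core (t : String) :
    pvDI.foldl (fun tags it =>
      let has_exclusion := it.2.1.any (fun ex => PySem.Str.isIn ex t)
      if !has_exclusion then PySem.Set.add tags it.1 else tags) PySem.Set.empty
  = PySem.Set.ofList ((pvDI.filter (fun it =>
      PySem.Set.isdisjoint
        (PySem.Set.ofList ((pvDI.flatMap (fun it => it.2.1)).filter (fun w => PySem.Str.isIn w t)))
        it.2.1)).map (fun it => it.1)) := by
  rw [List.filter_congr (q := fun it => !(it.2.1.any (fun w => PySem.Str.isIn w t)))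
      (by intro it hit; fin_cases hit <;> exact disjoint_eq t _ _ (by decide))]
  simp only [pvDI, List.foldl_cons, List.foldl_nil, List.filter_cons, List.filter_nil]
  cases h1 : (["milk", "cheese", "butter", "cream", "paneer", "ghee", "egg", "fish", "chicken", "mutton", "meat"] : List String).any (fun w => PySem.Str.isIn w t) <;>
  cases h2 : (["fish", "chicken", "mutton", "meat", "prawn", "crab"] : List String).any (fun w => PySem.Str.isIn w t) <;>
  cases h3 : (["wheat", "flour", "maida", "bread", "roti", "naan", "paratha"] : List String).any (fun w => PySem.Str.isIn w t) <;>
  cases h4 : (["milk", "cheese", "butter", "cream", "paneer", "ghee"] : List String).any (fun w => PySem.Str.isIn w t) <;>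
  decide

-- ===== VERDICT (by name: the statement is the Claim_ definition above) =====
theorem infer_dietary_tags_spec : Claim_equal_infer_dietary_tags := by
  intro ingredients allergens _
  show _ = _
  exact core (PySem.Str.lower (PySem.Str.join " " (ingredients ++ allergens)))
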